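-- pv_equiv track=rewrite | github.com/Javierortizc/DgCr | En_onto.py | enonto
-- ===== SOURCE A (Python) =====
-- def enonto(onto, inf) :
--     index=2 #contador para el for siguente
--     inf_onto_resultado = []          #creo lista resultado con nombre de ontología
--     for diag in inf[2:]:           #para cada palabra (candidato a diagnostico)  tambien se puede hacer con el contador como indicie
--         if diag.isalpha() == True:                   #continua solo si es palabra (si es puntuación pasa a la siguiente)
--             for (code,term) in onto:
--                 if term in str(diag):            #si esta la palabra en el listado Snomed
--                     inf_onto_resultado.append((index,diag,code))
--         index+=1
--     return inf_onto_resultado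
-- ===== SOURCE B (Python) =====
-- def enonto(onto, inf):
--     # Index the ontology once by term, then for each word look up its distinct
--     # substrings in that index; order recovered by sorting on the onto position.
--     by_term = {}
--     for i, (code, term) in enumerate(onto):
--         by_term[term] = by_term.get(term, []) + [(i, code)]
--     out = []
--     for index, diag in enumerate(inf[2:], 2):
--         if diag.isalpha():
--             n = len(diag)
--             subs = dict.fromkeys(diag[a:b] for a in range(n) for b in range(a, n + 1))
--             hits = []
--             for sub in subs:
--                 hits += by_term.get(sub, [])
--             hits.sort(key=lambda t: t[0])
--             for i, code in hits:
--                 out.append((index, diag, code))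
--     return out
-- ===== Notes on version B (the rewrite author's own statement) =====
-- stated objective: faster
-- what changed: Instead of running a substring search of every ontology term against every word, B indexes the ontology by term in a dict once, enumerates each word's distinct substrings and looks them up in the index, restoring ontology order by sorting the hits on their onto position.
import Mathlib
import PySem

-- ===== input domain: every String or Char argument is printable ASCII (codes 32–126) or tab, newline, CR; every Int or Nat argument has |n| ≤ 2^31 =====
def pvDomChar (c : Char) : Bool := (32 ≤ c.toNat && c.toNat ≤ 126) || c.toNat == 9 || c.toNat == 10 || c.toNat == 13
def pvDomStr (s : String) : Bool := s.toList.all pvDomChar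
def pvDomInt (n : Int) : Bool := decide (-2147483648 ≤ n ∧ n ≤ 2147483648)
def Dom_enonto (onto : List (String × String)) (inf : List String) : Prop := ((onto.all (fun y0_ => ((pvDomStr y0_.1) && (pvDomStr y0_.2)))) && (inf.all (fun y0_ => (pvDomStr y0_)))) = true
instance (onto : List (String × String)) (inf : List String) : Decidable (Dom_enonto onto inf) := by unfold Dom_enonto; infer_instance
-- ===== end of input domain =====

-- B replaces A's per-(word,term) substring scans by a term-indexed dict queried with each word's distinct substrings (order restored by sorting on the onto position); equal return value proved.

-- ===== PORT A =====
def enonto (onto : List (String × String)) (inf : List String) : List (Int × String × String) :=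
  -- index=2; result=[]; for diag in inf[2:]: if diag.isalpha(): for (code,term) in onto: if term in diag: append; index+=1
  ((PySem.List.slice inf (some 2) none).foldl
    (fun (st : Int × List (Int × String × String)) diag =>
      let st' :=
        if PySem.Str.strIsalpha diag = true then
          (st.1, onto.foldl
            (fun r ct => if PySem.Str.isIn ct.2 diag then r ++ [(st.1, diag, ct.1)] else r) st.2)
        else st
      (st'.1 + 1, st'.2))
    (2, [])).2

-- ===== PORT B =====
-- by_term[term] = by_term.get(term, []) + [(i, code)] over enumerate(onto)
def pvByTerm (onto : List (String × String)) : PySem.Dict String (List (Int × String)) :=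
  (PySem.List.enumerate onto).foldl
    (fun d ic => d.modify ic.2.2 [] (fun v => v ++ [(ic.1, ic.2.1)])) PySem.Dict.empty

-- diag[a:b] for a in range(n) for b in range(a, n+1)
def pvAllSubs (diag : String) : List String :=
  (PySem.List.pyRange 0 (PySem.Str.len diag) 1).flatMap (fun a =>
    (PySem.List.pyRange a (PySem.Str.len diag + 1) 1).map (fun b =>
      PySem.Str.slice diag (some a) (some b)))

def enonto_alt (onto : List (String × String)) (inf : List String) : List (Int × String × String) :=
  (PySem.List.enumerate (PySem.List.slice inf (some 2) none) 2).foldl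
    (fun out id =>
      if PySem.Str.strIsalpha id.2 then
        (PySem.List.sorted
          ((PySem.List.dedup (pvAllSubs id.2)).foldl
            (fun h sub => h ++ (pvByTerm onto).getD sub []) [])
          (fun t => t.1)).foldl
          (fun out ic => out ++ [(id.1, id.2, ic.2)]) out
      else out)
    []

-- ===== PRECONDITION & SPEC =====
def Spec_enonto (onto : List (String × String)) (inf : List String) (out : List (Int × String × String)) : Prop := out = enonto_alt onto inf
instance (onto : List (String × String)) (inf : List String) (out : List (Int × String × String)) : Decidable (Spec_enonto onto inf out) := by unfold Spec_enonto; infer_instance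

-- ===== CLAIM (what is proved, stated in full; the proofs are below) =====
def Claim_equal_enonto : Prop := ∀ (onto : List (String × String)) (inf : List String), Dom_enonto onto inf → Spec_enonto onto inf (enonto onto inf)

-- ===== LEMMAS AND PROOFS =====

-- A's counter loop is the fold over the enumerated tail
theorem pv_counter_eq_enumerate {L : Type} (l : List String) (P : String → Bool)
    (f : Int → String → L → L) (i : Int) (acc : L) :
    (l.foldl (fun (st : Int × L) diag =>
        let st' := if P diag = true then (st.1, f st.1 diag st.2) else st
        (st'.1 + 1, st'.2)) (i, acc)).2
      = (PySem.List.enumerate l i).foldl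
          (fun out p => if P p.2 = true then f p.1 p.2 out else out) acc := by
  induction l generalizing i acc with
  | nil => simp [PySem.List.enumerate]
  | cons x xs ih =>
      simp only [List.foldl_cons, PySem.List.enumerate_cons]
      by_cases h : P x = true <;> simp only [h, if_pos, if_neg, ih, Bool.false_eq_true, not_false_iff]

-- the filtered enumeration, mapped forgetting the index, is the plain filtered map
theorem pv_enum_filter_map (onto : List (String × String)) (p : String → Bool) (i : Int) (diag : String) (s : Int) :
    ((PySem.List.enumerate onto s).filter (fun ic => p ic.2.2)).map (fun t => (i, diag, t.2.1))
      = (onto.filter (fun ct => p ct.2)).map (fun ct => (i, diag, ct.1)) := by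
  induction onto generalizing s with
  | nil => simp [PySem.List.enumerate]
  | cons x xs ih =>
      simp only [PySem.List.enumerate_cons, List.filter_cons]
      by_cases h : p x.2 <;> simp [h, ih]

-- one new element distributes over the flatMap of per-key filters (keys distinct)
theorem pv_flatMap_filter_cons (S : List String) (E : List (Int × String × String))
    (k : Int × String × String → String) (e : Int × String × String) (hS : S.Nodup) :
    (S.flatMap (fun s => ((e :: E).filter (fun x => k x == s)))).Perm
      ((if k e ∈ S then [e] else []) ++ S.flatMap (fun s => E.filter (fun x => k x == s))) := by
  induction S with
  | nil => simp
  | cons s S' ih =>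
      have hS' : S'.Nodup := hS.of_cons
      have hne : s ∉ S' := (List.nodup_cons.mp hS).1
      have ihh := ih hS'
      rw [List.flatMap_cons, List.flatMap_cons, List.filter_cons]
      by_cases h : k e == s
      · have hkes : k e = s := eq_of_beq h
        have hnotin : k e ∉ S' := hkes ▸ hne
        rw [if_pos h, if_pos (show k e ∈ s :: S' from hkes ▸ List.mem_cons_self)]
        rw [if_neg hnotin, List.nil_append] at ihh
        simp only [List.cons_append]
        exact List.Perm.cons e (ihh.append_left _)
      · rw [if_neg (by simpa using h)]
        by_cases hm : k e ∈ S'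
        · rw [if_pos hm, List.singleton_append] at ihh
          rw [if_pos (List.mem_cons_of_mem _ hm), List.singleton_append]
          exact (ihh.append_left _).trans List.perm_middle
        · have hmem : k e ∉ s :: S' := by
            intro hc
            rcases List.mem_cons.mp hc with hc | hc
            · exact absurd (by simp [hc]) (show ¬(k e == s) = true from by simpa using h)
            · exact hm hc
          rw [if_neg hm, List.nil_append] at ihh
          rw [if_neg hmem, List.nil_append]
          exact ihh.append_left _

-- gathering per-key groups over distinct keys is a permutation of the one-pass filter
theorem pv_flatMap_filter_perm (S : List String) (E : List (Int × String × String))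
    (k : Int × String × String → String) (q : Int × String × String → Bool)
    (hS : S.Nodup) (hq : ∀ e ∈ E, (q e = true ↔ k e ∈ S)) :
    (S.flatMap (fun s => E.filter (fun x => k x == s))).Perm (E.filter q) := by
  induction E with
  | nil => simp
  | cons e E' ih =>
      have he := hq e List.mem_cons_self
      have ih' := ih (fun x hx => hq x (List.mem_cons_of_mem _ hx))
      have hstep := pv_flatMap_filter_cons S E' k e hS
      by_cases hqe : q e = true
      · have hmem : k e ∈ S := he.mp hqe
        simp only [hmem, if_pos, List.singleton_append] at hstep
        rw [List.filter_cons_of_pos hqe]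
        exact hstep.trans (List.Perm.cons e ih')
      · have hmem : k e ∉ S := fun hc => hqe (he.mpr hc)
        simp only [hmem] at hstep
        rw [List.filter_cons_of_neg (by simpa using hqe)]
        exact hstep.trans ih'

-- every distinct substring list covers exactly the infixes (diag nonempty)
theorem pv_mem_allSubs (diag : String) (t : String) (hlen : diag.toList ≠ []) :
    t ∈ pvAllSubs diag ↔ t.toList <:+: diag.toList := by
  have hlen' : 0 < diag.toList.length := List.length_pos_iff.mpr hlen
  constructor
  · intro hmem
    simp only [pvAllSubs, List.mem_flatMap, List.mem_map] at hmem
    obtain ⟨a, ha, b, hb, ht⟩ := hmem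
    rw [PySem.List.mem_pyRange_one] at ha hb
    obtain ⟨a', rfl⟩ := Int.eq_ofNat_of_zero_le ha.1
    obtain ⟨b', rfl⟩ := Int.eq_ofNat_of_zero_le (le_trans ha.1 hb.1)
    have : t.toList = List.take (b' - a') (List.drop a' diag.toList) := by
      rw [← ht]
      simp only [PySem.Str.slice, PySem.Chars.slice_eq_listSlice]
      rw [PySem.List.slice_natCast]
      simp
    rw [this]
    exact ((List.take_prefix _ _).isInfix).trans ((List.drop_suffix _ _).isInfix)
  · intro hinf
    obtain ⟨s, u, hsu⟩ := hinf
    have hn := congrArg List.length hsu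
    simp only [List.length_append] at hn
    simp only [pvAllSubs, List.mem_flatMap, List.mem_map, PySem.Str.len_eq]
    by_cases ht0 : t.toList = []
    · refine ⟨0, ?_, 0, ?_, ?_⟩
      · rw [PySem.List.mem_pyRange_one]; omega
      · rw [PySem.List.mem_pyRange_one]; omega
      · apply String.toList_inj.mp
        have h0 : (0 : Int) = ((0 : Nat) : Int) := rfl
        simp only [PySem.Str.slice, PySem.Chars.slice_eq_listSlice, h0,
          PySem.List.slice_natCast]
        simpa using ht0.symm
    · have htpos : 0 < t.toList.length := List.length_pos_iff.mpr ht0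
      refine ⟨(s.length : Int), ?_, ((s.length + t.toList.length : Nat) : Int), ?_, ?_⟩
      · rw [PySem.List.mem_pyRange_one]; omega
      · rw [PySem.List.mem_pyRange_one]; omega
      · apply String.toList_inj.mp
        simp only [PySem.Str.slice, PySem.Chars.slice_eq_listSlice,
          PySem.List.slice_natCast]
        rw [← hsu]
        simp

-- the sorted hit list of an alpha word is exactly the enum-filtered match list
theorem pv_sorted_hits (onto : List (String × String)) (diag : String) (hlen : diag.toList ≠ []) :
    PySem.List.sorted
      ((PySem.List.dedup (pvAllSubs diag)).flatMap (fun sub => (pvByTerm onto).getD sub []))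
      (fun t => t.1)
      = ((PySem.List.enumerate onto).filter (fun ic => PySem.Str.isIn ic.2.2 diag)).map
          (fun ic => (ic.1, ic.2.1)) := by
  -- characterise the dict groups
  have hgroup : ∀ sub, (pvByTerm onto).getD sub []
      = (((PySem.List.enumerate onto).filter (fun ic => ic.2.2 == sub)).map (fun ic => (ic.1, ic.2.1))) := by
    intro sub
    have : pvByTerm onto = ((PySem.List.enumerate onto).map
        (fun ic => (ic.2.2, (ic.1, ic.2.1)))).foldl
        (fun d p => d.modify p.1 [] (fun v => v ++ [p.2])) PySem.Dict.empty := by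
      rw [List.foldl_map]
      rfl
    rw [this, PySem.Dict.getD_foldl_modify_append]
    simp [List.filter_map, List.map_map, Function.comp_def]
  refine PySem.List.sorted_eq_of_perm_of_pairwise_lt _ _ _ ?_ ?_
  · -- permutation
    refine List.Perm.symm ?_
    have hperm := pv_flatMap_filter_perm (PySem.List.dedup (pvAllSubs diag)) (PySem.List.enumerate onto)
        (fun ic => ic.2.2) (fun ic => PySem.Str.isIn ic.2.2 diag)
        (PySem.List.nodup_dedup _)
        (fun e _ => by
          rw [PySem.List.mem_dedup, PySem.Str.isIn_iff_infix, pv_mem_allSubs _ _ hlen])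
    have : ((PySem.List.dedup (pvAllSubs diag)).flatMap
        (fun sub => (PySem.List.enumerate onto).filter (fun ic => ic.2.2 == sub))).map (fun ic => (ic.1, ic.2.1))
        = (PySem.List.dedup (pvAllSubs diag)).flatMap (fun sub => (pvByTerm onto).getD sub []) := by
      rw [List.map_flatMap]
      refine List.flatMap_congr (fun sub _ => ?_)
      rw [hgroup]
    rw [← this]
    exact hperm.map _
  · -- strictly increasing indices
    have h1 : ((PySem.List.enumerate onto).filter (fun ic => PySem.Str.isIn ic.2.2 diag)).Pairwise
        (fun p q => p.1 < q.1) := (PySem.List.pairwise_lt_enumerate onto 0).sublist List.filter_sublist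
    exact (List.pairwise_map).mpr (h1.imp (fun h => h))

-- ===== VERDICT (by name: the statement is the Claim_ definition above) =====
theorem enonto_spec : Claim_equal_enonto := by
  intro onto inf _
  unfold Spec_enonto enonto enonto_alt
  have h1 := pv_counter_eq_enumerate (PySem.List.slice inf (some 2) none) PySem.Str.strIsalpha
      (fun i diag r => onto.foldl
        (fun r ct => if PySem.Str.isIn ct.2 diag then r ++ [(i, diag, ct.1)] else r) r)
      2 ([] : List (Int × String × String))
  rw [h1]
  refine PySem.List.foldl_congr_mem _ _ _ _ (fun acc p hp => ?_)
  by_cases halpha : PySem.Str.strIsalpha p.2 = true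
  · simp only [halpha, if_pos]
    have hlen : p.2.toList ≠ [] := by
      intro hnil
      have hempty : p.2 = "" := String.toList_inj.mp (by simpa using hnil)
      rw [hempty] at halpha
      exact absurd halpha (by decide)
    have hA : List.foldl (fun r ct => if PySem.Str.isIn ct.2 p.2 then r ++ [(p.1, p.2, ct.1)] else r) acc onto
        = acc ++ (onto.filter (fun ct => PySem.Str.isIn ct.2 p.2)).map (fun ct => (p.1, p.2, ct.1)) :=
      PySem.List.foldl_append_if _ _ onto acc
    have hB : List.foldl (fun h sub => h ++ (pvByTerm onto).getD sub []) [] (PySem.List.dedup (pvAllSubs p.2))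
        = ([] : List (Int × String)) ++ (PySem.List.dedup (pvAllSubs p.2)).flatMap (fun sub => (pvByTerm onto).getD sub []) :=
      PySem.List.foldl_append_eq_flatMap _ _ _
    rw [hA, hB, List.nil_append, pv_sorted_hits onto p.2 hlen]
    have hC : List.foldl (fun out ic => out ++ [(p.1, p.2, ic.2)]) acc
        (((PySem.List.enumerate onto).filter (fun ic => PySem.Str.isIn ic.2.2 p.2)).map (fun ic => (ic.1, ic.2.1)))
        = acc ++ ((((PySem.List.enumerate onto).filter (fun ic => PySem.Str.isIn ic.2.2 p.2)).map (fun ic => (ic.1, ic.2.1))).map (fun ic => (p.1, p.2, ic.2))) :=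
      PySem.List.foldl_append_singleton_eq_map _ _ _
    rw [hC, List.map_map]
    exact congrArg (acc ++ ·) (pv_enum_filter_map onto (fun t => PySem.Str.isIn t p.2) p.1 p.2 0).symm
  · rw [if_neg halpha, if_neg halpha]
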